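-- pv_equiv track=rewrite | github.com/Fraol7/Competitive-Programming | watering_plants.py | minimumRefill
-- ===== SOURCE A (Python) =====
-- from typing import List
--
-- def minimumRefill(plants: List[int], capacityA: int, capacityB: int) -> int:
--     left, right = 0, len(plants) - 1
--     alice = capacityA
--     bob = capacityB
--     ctr = 0
--     while right >= left:
--         if right == left and alice >= bob:
--             if alice < plants[left]:
--                 alice = capacityA
--                 ctr += 1
--             return ctr
--         elif right == left:
--             if bob < plants[left]:
--                 bob = capacityB
--                 ctr += 1
--             return ctr
--
--         if alice < plants[left]:
--             alice = capacityA
--             ctr += 1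
--
--         if bob < plants[right]:
--             bob = capacityB
--             ctr += 1
--
--         alice -= plants[left]
--         bob -= plants[right]
--         right -= 1
--         left += 1
--     return ctr
-- ===== SOURCE B (Python) =====
-- from typing import List
--
-- def _segment_sums(seq: List[int], cap: int) -> List[int]:
--     """Greedily partition seq: a new segment starts whenever the running segment
--     sum plus the next plant would exceed cap (i.e. the can must be refilled).
--     Returns the list of segment sums; the initial full can is segment sum 0."""
--     sums = [0]
--     for p in seq:
--         if sums[-1] + p > cap:
--             sums.append(p)
--         else:
--             sums[-1] += p
--     return sums
--
-- def minimumRefill(plants: List[int], capacityA: int, capacityB: int) -> int: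
--     n = len(plants)
--     half = n // 2
--     sa = _segment_sums(plants[:half], capacityA)
--     sb = _segment_sums(plants[n - half:][::-1], capacityB)
--     refills = len(sa) + len(sb) - 2
--     if n % 2 == 1:
--         mid = plants[half]
--         left_a = capacityA - sa[-1]
--         left_b = capacityB - sb[-1]
--         can = left_a if left_a >= left_b else left_b
--         if can < mid:
--             refills += 1
--     return refills
-- ===== Notes on version B (the rewrite author's own statement) =====
-- stated objective: alternative
-- what changed: Instead of A's interleaved two-pointer simulation tracking remaining water and a refill counter, B greedily partitions each independent half (Alice's first n//2 plants, Bob's reversed last n//2) into a materialized list of segment sums -- a new segment starts exactly when a refill would happen -- and reads the answer off the segment counts, with a separate middle-plant tie-break for odd n.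
import Mathlib
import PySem

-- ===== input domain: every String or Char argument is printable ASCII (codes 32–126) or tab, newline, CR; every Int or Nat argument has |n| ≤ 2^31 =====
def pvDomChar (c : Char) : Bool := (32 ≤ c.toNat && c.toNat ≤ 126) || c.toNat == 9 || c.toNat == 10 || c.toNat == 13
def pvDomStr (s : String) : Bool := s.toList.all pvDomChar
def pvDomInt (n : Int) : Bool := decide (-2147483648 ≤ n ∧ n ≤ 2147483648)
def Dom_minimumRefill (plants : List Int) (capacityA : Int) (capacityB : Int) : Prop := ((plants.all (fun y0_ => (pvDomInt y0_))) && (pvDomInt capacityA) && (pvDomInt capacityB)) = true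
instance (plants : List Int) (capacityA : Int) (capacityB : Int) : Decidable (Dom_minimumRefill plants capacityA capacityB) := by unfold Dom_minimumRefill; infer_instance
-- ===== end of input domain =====

-- B replaces A's interleaved two-pointer simulation (remaining water + counter) by greedily
-- partitioning each independent half into segment sums, reading the refill count off the
-- number of segments; alternative decomposition, same O(n) cost.


-- ===== PORT A =====
-- A's while-loop, step for step; fuel is a pure totality device (the loop makes at most
-- ⌈n/2⌉ ≤ n iterations, so fuel = plants.length is never exhausted).  plants[left] /
-- plants[right] are always in range while the loop runs, so pyGetD's default 0 is a
-- totality guard only (Python never raises here).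
def loopA (plants : List Int) (capacityA capacityB l r alice bob ctr : Int) : Nat → Int
  | 0 => ctr
  | fuel + 1 =>
    if r ≥ l then
      if r = l ∧ alice ≥ bob then
        if alice < PySem.List.pyGetD plants l 0 then ctr + 1 else ctr
      else if r = l then
        if bob < PySem.List.pyGetD plants l 0 then ctr + 1 else ctr
      else
        let pl := PySem.List.pyGetD plants l 0
        let pr := PySem.List.pyGetD plants r 0
        let ac : Int × Int := if alice < pl then (capacityA, ctr + 1) else (alice, ctr)
        let bc : Int × Int := if bob < pr then (capacityB, ac.2 + 1) else (bob, ac.2)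
        loopA plants capacityA capacityB (l + 1) (r - 1) (ac.1 - pl) (bc.1 - pr) bc.2 fuel
    else ctr

def minimumRefill (plants : List Int) (capacityA : Int) (capacityB : Int) : Int :=
  loopA plants capacityA capacityB 0 ((plants.length : Int) - 1) capacityA capacityB 0 plants.length

-- ===== PORT B =====
-- Source B appends each new segment sum at the tail of `sums` and reads `sums[-1]`; the port
-- keeps the same list most-recent-FIRST (cons instead of append), so `sums[-1]` is `headD`.
def segStep (cap : Int) (sums : List Int) (p : Int) : List Int :=
  match sums with
  | [] => [p]   -- unreachable: the fold starts from [0]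
  | s :: rest => if s + p > cap then p :: s :: rest else (s + p) :: rest

def segmentSums (seq : List Int) (cap : Int) : List Int :=
  seq.foldl (segStep cap) [0]

-- plants[:half] / plants[n-half:] are ported as take/drop (equal to Python's slice for
-- these nonnegative bounds); plants[half] is in range whenever n is odd, so getD's
-- default 0 is a totality guard only.
def minimumRefill_alt (plants : List Int) (capacityA : Int) (capacityB : Int) : Int :=
  let n := plants.length
  let half := n / 2
  let sa := segmentSums (plants.take half) capacityA
  let sb := segmentSums ((plants.drop (n - half)).reverse) capacityB
  let refills : Int := (sa.length : Int) + (sb.length : Int) - 2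
  if n % 2 = 1 then
    let mid := plants.getD half 0
    let leftA := capacityA - sa.headD 0
    let leftB := capacityB - sb.headD 0
    let can := if leftA ≥ leftB then leftA else leftB
    if can < mid then refills + 1 else refills
  else refills

-- ===== PRECONDITION & SPEC =====
def Spec_minimumRefill (plants : List Int) (capacityA : Int) (capacityB : Int) (out : Int) : Prop := out = minimumRefill_alt plants capacityA capacityB
instance (plants : List Int) (capacityA : Int) (capacityB : Int) (out : Int) : Decidable (Spec_minimumRefill plants capacityA capacityB out) := by unfold Spec_minimumRefill; infer_instance

-- ===== CLAIM (what is proved, stated in full; the proofs are below) =====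
def Claim_equal_minimumRefill : Prop := ∀ (plants : List Int) (capacityA : Int) (capacityB : Int), Dom_minimumRefill plants capacityA capacityB → Spec_minimumRefill plants capacityA capacityB (minimumRefill plants capacityA capacityB)

-- ===== LEMMAS AND PROOFS =====

-- proof-only abstraction of one watering step: remaining water and refill counter
def waterStep (cap : Int) (st : Int × Int) (p : Int) : Int × Int :=
  if st.1 < p then (cap - p, st.2 + 1) else (st.1 - p, st.2)

-- proof-only middle form: B's value expressed with waterStep folds over the two halves
def splitCount (capacityA capacityB : Int) (s : List Int) (a b : Int) : Int :=
  let n := s.length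
  let half := n / 2
  let fa := (s.take half).foldl (waterStep capacityA) (a, 0)
  let fb := ((s.drop (n - half)).reverse).foldl (waterStep capacityB) (b, 0)
  let refills := fa.2 + fb.2
  if n % 2 = 1 then
    let mid := s.getD half 0
    if fa.1 ≥ fb.1 then (if fa.1 < mid then refills + 1 else refills)
    else (if fb.1 < mid then refills + 1 else refills)
  else refills

lemma waterStep_foldl_shift (cap : Int) : ∀ (t : List Int) (a r : Int),
    t.foldl (waterStep cap) (a, r)
      = ((t.foldl (waterStep cap) (a, 0)).1, r + (t.foldl (waterStep cap) (a, 0)).2) := by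
  intro t
  induction t with
  | nil => intro a r; simp
  | cons p t ih =>
    intro a r
    simp only [List.foldl_cons, waterStep]
    by_cases h : a < p
    · simp only [if_pos h]
      rw [ih (cap - p) (r + 1), ih (cap - p) (0 + 1)]
      dsimp only
      simp only [Prod.mk.injEq]
      exact ⟨trivial, by ring⟩
    · simp only [if_neg h]
      rw [ih (a - p) r]

-- the segment-sum fold tracks the watering fold: head ↔ water used in the current
-- segment, length growth ↔ refill count
lemma seg_water (cap : Int) : ∀ (seq : List Int) (s : Int) (rest : List Int),
    (seq.foldl (segStep cap) (s :: rest)).headD 0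
        = cap - (seq.foldl (waterStep cap) (cap - s, 0)).1
    ∧ ((seq.foldl (segStep cap) (s :: rest)).length : Int)
        = (rest.length : Int) + 1 + (seq.foldl (waterStep cap) (cap - s, 0)).2 := by
  intro seq
  induction seq with
  | nil => intro s rest; simp
  | cons p seq ih =>
    intro s rest
    simp only [List.foldl_cons, segStep, waterStep]
    by_cases h : s + p > cap
    · have h' : cap - s < p := by omega
      simp only [if_pos h, if_pos h']
      obtain ⟨h1, h2⟩ := ih p (s :: rest)
      rw [waterStep_foldl_shift cap seq (cap - p) (0 + 1)]
      dsimp only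
      constructor
      · exact h1
      · rw [h2]; simp; ring
    · have h' : ¬ (cap - s < p) := by omega
      simp only [if_neg h, if_neg h']
      obtain ⟨h1, h2⟩ := ih (s + p) rest
      have e : cap - s - p = cap - (s + p) := by ring
      rw [e]
      exact ⟨h1, h2⟩

-- B's port equals the waterStep middle form
lemma alt_eq_splitCount (plants : List Int) (ca cb : Int) :
    minimumRefill_alt plants ca cb = splitCount ca cb plants ca cb := by
  unfold minimumRefill_alt splitCount segmentSums
  obtain ⟨ha1, ha2⟩ := seg_water ca (plants.take (plants.length / 2)) 0 []
  obtain ⟨hb1, hb2⟩ := seg_water cb ((plants.drop (plants.length - plants.length / 2)).reverse) 0 []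
  simp only [sub_zero, List.length_nil, Nat.cast_zero, zero_add] at ha1 ha2 hb1 hb2
  dsimp only
  rw [ha1, ha2, hb1, hb2]
  by_cases hodd : plants.length % 2 = 1
  · simp only [if_pos hodd]
    by_cases hge : ca - (ca - (((plants.take (plants.length / 2)).foldl (waterStep ca) (ca, 0)).1))
        ≥ cb - (cb - ((((plants.drop (plants.length - plants.length / 2)).reverse).foldl (waterStep cb) (cb, 0)).1))
    · have hge' : ((plants.take (plants.length / 2)).foldl (waterStep ca) (ca, 0)).1
          ≥ (((plants.drop (plants.length - plants.length / 2)).reverse).foldl (waterStep cb) (cb, 0)).1 := by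
        omega
      simp only [if_pos hge, if_pos hge']
      split_ifs with h1 h2 h2 <;> omega
    · have hge' : ¬ (((plants.take (plants.length / 2)).foldl (waterStep ca) (ca, 0)).1
          ≥ (((plants.drop (plants.length - plants.length / 2)).reverse).foldl (waterStep cb) (cb, 0)).1) := by
        omega
      simp only [if_neg hge, if_neg hge']
      split_ifs with h1 h2 h2 <;> omega
  · simp only [if_neg hodd]
    ring

lemma splitCount_nil (ca cb a b : Int) : splitCount ca cb [] a b = 0 := rfl

lemma splitCount_single (ca cb a b p : Int) :
    splitCount ca cb [p] a b
      = if a ≥ b then (if a < p then 1 else 0) else (if b < p then 1 else 0) := by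
  simp only [splitCount, List.length_cons, List.length_nil]
  norm_num

-- peeling one plant off each end of the segment
lemma splitCount_cons_concat (ca cb a b p q : Int) (m : List Int) :
    splitCount ca cb (p :: (m ++ [q])) a b
      = (if a < p then 1 else 0) + (if b < q then 1 else 0)
        + splitCount ca cb m ((if a < p then ca else a) - p) ((if b < q then cb else b) - q) := by
  have hlen : (p :: (m ++ [q])).length = m.length + 2 := by simp
  have hhalf : (m.length + 2) / 2 = m.length / 2 + 1 := by omega
  have hd2 : m.length / 2 ≤ m.length := Nat.div_le_self _ _
  have htake : (p :: (m ++ [q])).take (m.length / 2 + 1)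
      = p :: m.take (m.length / 2) := by
    simp [List.take_append_of_le_length hd2]
  have hdle : m.length - m.length / 2 ≤ m.length := Nat.sub_le _ _
  have hdrop : (p :: (m ++ [q])).drop (m.length + 2 - (m.length / 2 + 1))
      = m.drop (m.length - m.length / 2) ++ [q] := by
    have e : m.length + 2 - (m.length / 2 + 1) = (m.length - m.length / 2) + 1 := by omega
    rw [e]
    simp [List.drop_append_of_le_length hdle]
  simp only [splitCount, hlen, hhalf, htake, hdrop]
  rw [List.reverse_append]
  simp only [List.reverse_cons, List.reverse_nil, List.nil_append, List.singleton_append,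
    List.foldl_cons]
  have hmodd : (m.length + 2) % 2 = m.length % 2 := by omega
  have hgetD : m.length % 2 = 1 →
      (m ++ [q])[m.length / 2]?.getD 0 = m[m.length / 2]?.getD 0 := by
    intro h1
    have hlt : m.length / 2 < m.length := by omega
    rw [List.getElem?_append_left hlt]
  have hA := waterStep_foldl_shift ca (m.take (m.length / 2))
  have hB := waterStep_foldl_shift cb ((m.drop (m.length - m.length / 2)).reverse)
  simp only [waterStep, hmodd]
  by_cases ha : a < p <;> by_cases hb : b < q <;>
    simp only [ha, hb, if_true, if_false]
  · rw [hA (ca - p) (0 + 1), hB (cb - q) (0 + 1)]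
    dsimp only
    rcases Nat.mod_two_eq_zero_or_one m.length with hm | hm
    · simp only [hm]; norm_num; try ring
    · simp only [hm]; norm_num; try (rw [hgetD hm]); try (split_ifs <;> ring)
  · rw [hA (ca - p) (0 + 1), hB (b - q) 0]
    dsimp only
    rcases Nat.mod_two_eq_zero_or_one m.length with hm | hm
    · simp only [hm]; norm_num; try ring
    · simp only [hm]; norm_num; try (rw [hgetD hm]); try (split_ifs <;> ring)
  · rw [hA (a - p) 0, hB (cb - q) (0 + 1)]
    dsimp only
    rcases Nat.mod_two_eq_zero_or_one m.length with hm | hm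
    · simp only [hm]; norm_num; try ring
    · simp only [hm]; norm_num; try (rw [hgetD hm]); try (split_ifs <;> ring)
  · rw [hA (a - p) 0, hB (b - q) 0]
    dsimp only
    rcases Nat.mod_two_eq_zero_or_one m.length with hm | hm
    · simp only [hm]; norm_num; try ring
    · simp only [hm]; norm_num
      rw [hgetD hm]

-- the heart of the equivalence: A's interleaved loop over the segment s (between
-- equal-length pre and post) computes ctr plus the split count of s.
lemma loopA_split (ca cb : Int) : ∀ (fuel : Nat) (s pre post : List Int) (a b c : Int),
    pre.length = post.length → s.length ≤ fuel →
    loopA (pre ++ s ++ post) ca cb (pre.length : Int)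
        ((pre.length : Int) + (s.length : Int) - 1) a b c fuel
      = c + splitCount ca cb s a b := by
  intro fuel
  induction fuel with
  | zero =>
    intro s pre post a b c _ hf
    have : s = [] := List.eq_nil_of_length_eq_zero (Nat.le_zero.mp hf)
    subst this
    simp [loopA, splitCount_nil]
  | succ fuel ih =>
    intro s pre post a b c hlen hf
    match s with
    | [] =>
      have : ¬ ((pre.length : Int) + (0 : Int) - 1 ≥ (pre.length : Int)) := by omega
      simp [loopA, splitCount_nil]
    | p :: rest =>
      rcases rest.eq_nil_or_concat with rfl | ⟨m, q, rfl⟩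
      · have hget : PySem.List.pyGetD (pre ++ [p] ++ post) (pre.length : Int) 0 = p := by
          rw [PySem.List.pyGetD_natCast]
          simp [List.getD]
        have hcond : ((pre.length : Int) + (1 : Int) - 1 ≥ (pre.length : Int)) := by omega
        have heq : ((pre.length : Int) + (1 : Int) - 1) = (pre.length : Int) := by omega
        simp only [List.length_cons, List.length_nil, Nat.cast_one, zero_add,
          loopA, heq, if_pos, ge_iff_le, le_refl, true_and]
        rw [hget, splitCount_single]
        by_cases hab : b ≤ a <;> simp [hab, ge_iff_le] <;> split_ifs <;> ring
      · simp only [List.concat_eq_append] at hf ⊢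
        have hsl : (p :: (m ++ [q])).length = m.length + 2 := by simp
        rw [hsl]
        have hc1 : ((pre.length : Int) + ((m.length + 2 : Nat) : Int) - 1 ≥ (pre.length : Int)) := by
          push_cast; omega
        have hc2 : ((pre.length : Int) + ((m.length + 2 : Nat) : Int) - 1) ≠ (pre.length : Int) := by
          push_cast; omega
        have hgetl : PySem.List.pyGetD (pre ++ (p :: (m ++ [q])) ++ post) (pre.length : Int) 0 = p := by
          rw [PySem.List.pyGetD_natCast]
          simp [List.getD]
        have hgetr : PySem.List.pyGetD (pre ++ (p :: (m ++ [q])) ++ post)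
            ((pre.length : Int) + ((m.length + 2 : Nat) : Int) - 1) 0 = q := by
          have e1 : pre ++ (p :: (m ++ [q])) ++ post = (pre ++ p :: m) ++ (q :: post) := by simp
          have e2 : ((pre.length : Int) + ((m.length + 2 : Nat) : Int) - 1)
              = (((pre ++ p :: m).length : Nat) : Int) := by push_cast; simp; omega
          rw [e1, e2, PySem.List.pyGetD_natCast]
          simp [List.getD]
        have hc2' : ¬(((pre.length : Int) + ((m.length + 2 : Nat) : Int) - 1) = (pre.length : Int) ∧ a ≥ b) :=
          fun h => hc2 h.1
        simp only [loopA, if_pos hc1, if_neg hc2', if_neg hc2, hgetl, hgetr]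
        have e1 : pre ++ p :: (m ++ [q]) ++ post = (pre ++ [p]) ++ m ++ (q :: post) := by simp
        have e2 : ((pre.length : Int) + ((m.length + 2 : Nat) : Int) - 1 - 1)
            = (((pre ++ [p]).length : Int) + (m.length : Int) - 1) := by
          simp only [List.length_append, List.length_cons, List.length_nil]
          push_cast; ring
        have e3 : ((pre.length : Int) + 1) = (((pre ++ [p]).length : Nat) : Int) := by
          simp
        have h1 : (pre ++ [p]).length = (q :: post).length := by simp [hlen]
        have h2 : m.length ≤ fuel := by simp at hf; omega
        rw [splitCount_cons_concat]
        by_cases ha : a < p <;> by_cases hb : b < q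
        · simp only [if_pos ha, if_pos hb]
          rw [e1, e2, e3, ih m (pre ++ [p]) (q :: post) (ca - p) (cb - q) (c + 1 + 1) h1 h2]
          ring
        · simp only [if_pos ha, if_neg hb]
          rw [e1, e2, e3, ih m (pre ++ [p]) (q :: post) (ca - p) (b - q) (c + 1) h1 h2]
          ring
        · simp only [if_neg ha, if_pos hb]
          rw [e1, e2, e3, ih m (pre ++ [p]) (q :: post) (a - p) (cb - q) (c + 1) h1 h2]
          ring
        · simp only [if_neg ha, if_neg hb]
          rw [e1, e2, e3, ih m (pre ++ [p]) (q :: post) (a - p) (b - q) c h1 h2]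
          ring

-- ===== VERDICT (by name: the statement is the Claim_ definition above) =====
theorem minimumRefill_spec : Claim_equal_minimumRefill := by
  intro plants ca cb _
  unfold Spec_minimumRefill minimumRefill
  rw [alt_eq_splitCount]
  have h := loopA_split ca cb plants.length plants [] [] ca cb 0 rfl (le_refl _)
  simpa using h
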